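-- pv_equiv track=rewrite | github.com/any-stories/to-be-slack | src/core/message_builder.py | get_greeting_text
-- ===== SOURCE A (Python) =====
-- def get_greeting_text(hour: int) -> str:
--     GREETING_TEXTS = {
--         (0, 5): "还不滚去睡觉?",
--         (5, 11): "上午好",
--         (11, 13): "中午好",
--         (13, 19): "下午好",
--         (19, 24): "晚上好",
--     }
--     for (start, end), text in GREETING_TEXTS.items():
--         if start <= hour < end:
--             return text
--     return ""
-- ===== SOURCE B (Python) =====
-- _TABLE = (["还不滚去睡觉?"] * 5 + ["上午好"] * 6 + ["中午好"] * 2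
--           + ["下午好"] * 6 + ["晚上好"] * 5)
--
--
-- def get_greeting_text(hour: int) -> str:
--     return _TABLE[hour] if 0 <= hour < 24 else ""
-- ===== Notes on version B (the rewrite author's own statement) =====
-- stated objective: idiomatic
-- what changed: Replaces the linear scan over range-keyed dict entries with a precomputed per-hour lookup table indexed directly by the hour.
import Mathlib
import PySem

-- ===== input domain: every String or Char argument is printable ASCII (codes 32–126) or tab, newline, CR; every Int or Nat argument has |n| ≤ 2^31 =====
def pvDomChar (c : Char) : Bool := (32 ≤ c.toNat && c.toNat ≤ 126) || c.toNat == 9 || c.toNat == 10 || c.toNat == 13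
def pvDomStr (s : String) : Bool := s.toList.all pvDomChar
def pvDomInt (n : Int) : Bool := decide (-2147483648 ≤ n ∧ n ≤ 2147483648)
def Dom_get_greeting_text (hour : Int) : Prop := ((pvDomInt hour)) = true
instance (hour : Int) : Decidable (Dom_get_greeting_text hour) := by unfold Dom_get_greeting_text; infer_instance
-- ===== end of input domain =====

-- B replaces A's linear scan over range-keyed dict entries with a direct index into a precomputed per-hour table (idiomatic; same result).

-- ===== PORT A =====
-- the dict literal, as an insertion-ordered association list of ((start, end), text)
def greetingTexts : List ((Int × Int) × String) :=
  [((0, 5), "还不滚去睡觉?"), ((5, 11), "上午好"), ((11, 13), "中午好"),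
   ((13, 19), "下午好"), ((19, 24), "晚上好")]

-- the for-loop with early return: first matching range wins, else ""
def greetLoop (hour : Int) : List ((Int × Int) × String) → String
  | [] => ""
  | ((s, e), t) :: rest => if s ≤ hour ∧ hour < e then t else greetLoop hour rest

def get_greeting_text (hour : Int) : String := greetLoop hour greetingTexts

-- ===== PORT B =====
def greetTable : List String :=
  List.replicate 5 "还不滚去睡觉?" ++ List.replicate 6 "上午好" ++ List.replicate 2 "中午好"
    ++ List.replicate 6 "下午好" ++ List.replicate 5 "晚上好"

def get_greeting_text_alt (hour : Int) : String :=
  if 0 ≤ hour ∧ hour < 24 then (PySem.List.pyGet? greetTable hour).getD "" else ""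

-- ===== PRECONDITION & SPEC =====
def Spec_get_greeting_text (hour : Int) (out : String) : Prop := out = get_greeting_text_alt hour
instance (hour : Int) (out : String) : Decidable (Spec_get_greeting_text hour out) := by unfold Spec_get_greeting_text; infer_instance

-- ===== CLAIM (what is proved, stated in full; the proofs are below) =====
def Claim_equal_get_greeting_text : Prop := ∀ (hour : Int), Dom_get_greeting_text hour → Spec_get_greeting_text hour (get_greeting_text hour)

-- ===== LEMMAS AND PROOFS =====
theorem greet_eq (hour : Int) : get_greeting_text hour = get_greeting_text_alt hour := by
  rcases lt_or_ge hour 0 with h | h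
  · simp only [get_greeting_text, get_greeting_text_alt, greetLoop, greetingTexts]
    rw [if_neg (by omega), if_neg (by omega), if_neg (by omega), if_neg (by omega),
        if_neg (by omega), if_neg (by omega)]
  · rcases lt_or_ge hour 24 with h24 | h24
    · obtain ⟨n, rfl⟩ : ∃ n : ℕ, hour = (n : Int) := ⟨hour.toNat, (Int.toNat_of_nonneg h).symm⟩
      have hn : n < 24 := by exact_mod_cast h24
      interval_cases n <;> decide
    · simp only [get_greeting_text, get_greeting_text_alt, greetLoop, greetingTexts]
      rw [if_neg (by omega), if_neg (by omega), if_neg (by omega), if_neg (by omega),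
          if_neg (by omega), if_neg (by omega)]

-- ===== VERDICT (by name: the statement is the Claim_ definition above) =====
theorem get_greeting_text_spec : Claim_equal_get_greeting_text := by
  intro hour _; exact greet_eq hour
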